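-- pv_equiv track=rewrite | github.com/hong8yung/algorithm | Programmers/체육복.py | solution
-- ===== SOURCE A (Python) =====
-- def solution(n, lost, reserve):
--     answer = 0
--
--     and_set = set(lost) & set(reserve)
--     lost = list(set(lost) - and_set)
--     reserve = list(set(reserve) - and_set)
--
--     lost.sort()
--     reserve.sort()
--
--     for i in lost:
--         if i-1 in reserve:
--             reserve.remove(i-1)
--             continue
--         elif i+1 in reserve:
--             reserve.remove(i+1)
--             continue
--         n -= 1
--
--     answer = n
--     return answer
-- ===== SOURCE B (Python) =====
-- def solution(n, lost, reserve):
--     # Two-pointer merge over the two sorted disjoint lists; left neighbour preferred.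
--     L = sorted(set(lost) - set(reserve))
--     R = sorted(set(reserve) - set(lost))
--     li = ri = 0
--     unmatched = 0
--     while li < len(L):
--         i = L[li]
--         if ri < len(R) and R[ri] < i - 1:
--             ri += 1
--         elif ri < len(R) and R[ri] <= i + 1:
--             li += 1
--             ri += 1
--         else:
--             unmatched += 1
--             li += 1
--     return n - unmatched
-- ===== Notes on version B (the rewrite author's own statement) =====
-- stated objective: faster
-- what changed: A repeatedly scans the reserve list for i-1/i+1 and calls list.remove inside its loop; B does a single two-pointer merge of the two sorted disjoint lists (dedup via set difference, sort once), counting unmatched lost positions with no inner scans or removals.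
import Mathlib
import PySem

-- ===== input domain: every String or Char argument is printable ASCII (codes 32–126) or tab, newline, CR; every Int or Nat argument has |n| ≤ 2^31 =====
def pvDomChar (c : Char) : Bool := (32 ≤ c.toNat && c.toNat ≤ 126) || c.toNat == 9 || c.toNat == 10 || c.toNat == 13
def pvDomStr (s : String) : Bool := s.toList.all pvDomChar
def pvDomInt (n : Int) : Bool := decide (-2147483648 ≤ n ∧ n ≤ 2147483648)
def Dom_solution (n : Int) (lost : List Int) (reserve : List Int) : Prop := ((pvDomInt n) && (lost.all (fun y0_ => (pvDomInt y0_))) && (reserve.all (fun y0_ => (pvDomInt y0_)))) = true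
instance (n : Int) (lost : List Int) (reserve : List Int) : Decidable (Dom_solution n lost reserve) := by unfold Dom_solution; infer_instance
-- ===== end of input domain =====

-- B replaces A's per-lost scan-and-remove over the reserve list by a single two-pointer
-- merge of the two sorted disjoint lists (faster in a timing run: no inner scans).

-- ===== PORT A =====
-- the for-loop of A: state is (reserve, n); branches in A's order
def pvAloop (lost : List Int) (reserve : List Int) (n : Int) : Int :=
  match lost with
  | [] => n
  | i :: rest =>
    if (i - 1) ∈ reserve then
      pvAloop rest ((PySem.List.remove? reserve (i - 1)).getD reserve) n
    else if (i + 1) ∈ reserve then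
      pvAloop rest ((PySem.List.remove? reserve (i + 1)).getD reserve) n
    else
      pvAloop rest reserve (n - 1)

def solution (n : Int) (lost : List Int) (reserve : List Int) : Int :=
  let andSet := PySem.Set.inter (PySem.Set.ofList lost) (PySem.Set.ofList reserve)
  let lost2 := PySem.Set.diff (PySem.Set.ofList lost) andSet
  let reserve2 := PySem.Set.diff (PySem.Set.ofList reserve) andSet
  let lostS := PySem.List.sorted lost2 (fun x => x) false
  let reserveS := PySem.List.sorted reserve2 (fun x => x) false
  pvAloop lostS reserveS n

-- ===== PORT B =====
-- B's while loop over indices li/ri = structural merge of the two sorted suffixes,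
-- counting unmatched lost positions
def pvMerge (L R : List Int) : Int :=
  match L, R with
  | [], _ => 0
  | _ :: L', [] => 1 + pvMerge L' []
  | i :: L', r :: R' =>
    if r < i - 1 then pvMerge (i :: L') R'
    else if r ≤ i + 1 then pvMerge L' R'
    else 1 + pvMerge L' (r :: R')
termination_by L.length + R.length

def solution_alt (n : Int) (lost : List Int) (reserve : List Int) : Int :=
  let L := PySem.List.sorted (PySem.Set.diff (PySem.Set.ofList lost) (PySem.Set.ofList reserve)) (fun x => x) false
  let R := PySem.List.sorted (PySem.Set.diff (PySem.Set.ofList reserve) (PySem.Set.ofList lost)) (fun x => x) false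
  n - pvMerge L R

-- ===== PRECONDITION & SPEC =====
def Spec_solution (n : Int) (lost : List Int) (reserve : List Int) (out : Int) : Prop := out = solution_alt n lost reserve
instance (n : Int) (lost : List Int) (reserve : List Int) (out : Int) : Decidable (Spec_solution n lost reserve out) := by unfold Spec_solution; infer_instance

-- ===== CLAIM (what is proved, stated in full; the proofs are below) =====
def Claim_equal_solution : Prop := ∀ (n : Int) (lost : List Int) (reserve : List Int), Dom_solution n lost reserve → Spec_solution n lost reserve (solution n lost reserve)

-- ===== LEMMAS AND PROOFS =====

-- a reserve value below every lost-1 can never be matched by A's loop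
lemma pvAloop_skip (L : List Int) (R : List Int) (r : Int) (n : Int)
    (h : ∀ i ∈ L, r < i - 1) :
    pvAloop L (r :: R) n = pvAloop L R n := by
  induction L generalizing R n with
  | nil => rfl
  | cons i L' ih =>
    have hri : r < i - 1 := h i (by simp)
    have h1 : ((i - 1) ∈ r :: R) ↔ ((i - 1) ∈ R) := by
      simp only [List.mem_cons]
      constructor
      · rintro (h' | h') <;> [omega; exact h']
      · exact Or.inr
    have h2 : ((i + 1) ∈ r :: R) ↔ ((i + 1) ∈ R) := by
      simp only [List.mem_cons]
      constructor
      · rintro (h' | h') <;> [omega; exact h']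
      · exact Or.inr
    have htail : ∀ j ∈ L', r < j - 1 := fun j hj => h j (by simp [hj])
    by_cases hm1 : (i - 1) ∈ R
    · have hrem := PySem.List.remove?_eq_some_erase R (i - 1) hm1
      have hcons : PySem.List.remove? (r :: R) (i - 1) = some (r :: R.erase (i - 1)) := by
        rw [PySem.List.remove?_cons_of_ne R (by omega : r ≠ i - 1), hrem]; rfl
      simp only [pvAloop, h1, hm1, if_pos, hcons, hrem, Option.getD_some]
      exact ih _ _ htail
    · by_cases hm2 : (i + 1) ∈ R
      · have hrem := PySem.List.remove?_eq_some_erase R (i + 1) hm2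
        have hcons : PySem.List.remove? (r :: R) (i + 1) = some (r :: R.erase (i + 1)) := by
          rw [PySem.List.remove?_cons_of_ne R (by omega : r ≠ i + 1), hrem]; rfl
        simp only [pvAloop, h1, h2, hm1, hm2, if_pos, hcons, hrem, Option.getD_some]
        exact ih _ _ htail
      · simp only [pvAloop, h1, h2, hm1, hm2, if_neg, not_false_iff]
        exact ih _ _ htail

lemma not_mem_of_lt_head {r x : Int} {R : List Int}
    (hs : (r :: R).Pairwise (· < ·)) (hx : x < r) : x ∉ r :: R := by
  intro hmem
  rcases List.mem_cons.mp hmem with h | h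
  · omega
  · have := (List.pairwise_cons.mp hs).1 x h
    omega

-- main loop equivalence on sorted, disjoint lists
lemma pvAloop_eq_merge (L R : List Int) (n : Int)
    (hL : L.Pairwise (· < ·)) (hR : R.Pairwise (· < ·))
    (hdisj : ∀ x ∈ L, x ∉ R) :
    pvAloop L R n = n - pvMerge L R := by
  induction L generalizing R n with
  | nil => simp [pvAloop, pvMerge]
  | cons i L' ihL =>
    have hL' : L'.Pairwise (· < ·) := (List.pairwise_cons.mp hL).2
    have hLhead : ∀ j ∈ L', i < j := (List.pairwise_cons.mp hL).1
    induction R generalizing n with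
    | nil =>
      have hnil : ∀ x ∈ L', x ∉ ([] : List Int) := by simp
      simp only [pvAloop, List.not_mem_nil, if_neg, not_false_iff, pvMerge]
      rw [ihL [] (n - 1) hL' List.Pairwise.nil hnil]
      ring
    | cons r R' ihR =>
      have hR' : R'.Pairwise (· < ·) := (List.pairwise_cons.mp hR).2
      have hRhead : ∀ s ∈ R', r < s := (List.pairwise_cons.mp hR).1
      have hir : i ≠ r := fun h => hdisj i (by simp) (by simp [h])
      by_cases hc1 : r < i - 1
      · -- B drops r; A never uses r (it is below every lost-1)
        have hskip : pvAloop (i :: L') (r :: R') n = pvAloop (i :: L') R' n := by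
          apply pvAloop_skip
          intro j hj
          rcases List.mem_cons.mp hj with h | h
          · omega
          · have := hLhead j h; omega
        have hdisjR' : ∀ x ∈ i :: L', x ∉ R' := fun x hx hxr =>
          hdisj x hx (List.mem_cons_of_mem _ hxr)
        rw [hskip, ihR n hR' hdisjR']
        simp only [pvMerge, if_pos hc1]
      · by_cases hc2 : r ≤ i + 1
        · -- r = i-1 or r = i+1 (r ≠ i by disjointness): both match and drop head of R
          have hdisj' : ∀ x ∈ L', x ∉ R' := fun x hx h =>
            hdisj x (by simp [hx]) (by simp [h])
          have hstep : pvAloop (i :: L') (r :: R') n = pvAloop L' R' n := by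
            by_cases hr1 : r = i - 1
            · have hmem : (i - 1) ∈ r :: R' := by simp [hr1]
              have hrem : PySem.List.remove? (r :: R') (i - 1) = some R' := by
                rw [hr1]; exact PySem.List.remove?_cons_self (i - 1) R'
              simp only [pvAloop, hmem, if_pos, hrem, Option.getD_some]
            · have hr2 : r = i + 1 := by omega
              have hnm1 : (i - 1) ∉ r :: R' := not_mem_of_lt_head hR (by omega)
              have hmem : (i + 1) ∈ r :: R' := by simp [hr2]
              have hrem : PySem.List.remove? (r :: R') (i + 1) = some R' := by
                rw [hr2]; exact PySem.List.remove?_cons_self (i + 1) R'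
              simp only [pvAloop, hnm1, hmem, if_neg, not_false_iff, if_pos, hrem,
                Option.getD_some]
          rw [hstep, ihL R' n hL' hR' hdisj']
          simp only [pvMerge, if_neg hc1, if_pos hc2]
        · -- r > i+1: i is unmatched in both programs
          have hnm1 : (i - 1) ∉ r :: R' := not_mem_of_lt_head hR (by omega)
          have hnm2 : (i + 1) ∉ r :: R' := not_mem_of_lt_head hR (by omega)
          have hdisj' : ∀ x ∈ L', x ∉ r :: R' := fun x hx => hdisj x (by simp [hx])
          simp only [pvAloop, hnm1, hnm2, if_neg, not_false_iff]
          rw [ihL (r :: R') (n - 1) hL' hR hdisj']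
          simp only [pvMerge, if_neg hc1, if_neg hc2]
          ring

lemma pairwise_lt_of_sorted_nodup (xs : List Int) (hnd : xs.Nodup) :
    (PySem.List.sorted xs (fun x => x) false).Pairwise (· < ·) := by
  have hle := PySem.List.sorted_pairwise xs (fun x => x)
  have hnd' : (PySem.List.sorted xs (fun x => x) false).Nodup :=
    (PySem.List.sorted_perm xs (fun x => x) false).nodup_iff.mpr hnd
  exact (hle.and hnd').imp (fun h => lt_of_le_of_ne h.1 h.2)

-- the sorted difference only depends on which elements of xs the subtrahend holds
lemma sorted_diff_congr (xs : List Int) (S T : List Int)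
    (h : ∀ x ∈ xs, (x ∈ S ↔ x ∈ T)) :
    PySem.List.sorted (PySem.Set.diff (PySem.Set.ofList xs) S) (fun x => x) false
      = PySem.List.sorted (PySem.Set.diff (PySem.Set.ofList xs) T) (fun x => x) false := by
  apply PySem.List.sorted_eq_sorted_of_perm _ _ _ (fun a b hab => hab)
  refine (List.perm_ext_iff_of_nodup
    (PySem.Set.nodup_diff _ _ (PySem.Set.nodup_ofList xs))
    (PySem.Set.nodup_diff _ _ (PySem.Set.nodup_ofList xs))).mpr ?_
  intro x
  simp only [PySem.Set.mem_diff, PySem.Set.mem_ofList]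
  constructor
  · rintro ⟨h1, h2⟩; exact ⟨h1, fun ht => h2 ((h x h1).mpr ht)⟩
  · rintro ⟨h1, h2⟩; exact ⟨h1, fun ht => h2 ((h x h1).mp ht)⟩

-- ===== VERDICT (by name: the statement is the Claim_ definition above) =====
theorem solution_spec : Claim_equal_solution := by
  intro n lost reserve _
  unfold Spec_solution solution solution_alt
  simp only []
  rw [sorted_diff_congr lost _ (PySem.Set.ofList reserve)
      (by intro x hx
          simp only [PySem.Set.mem_inter, PySem.Set.mem_ofList]
          exact ⟨fun h => h.2, fun h => ⟨hx, h⟩⟩),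
    sorted_diff_congr reserve _ (PySem.Set.ofList lost)
      (by intro x hx
          simp only [PySem.Set.mem_inter, PySem.Set.mem_ofList]
          exact ⟨fun h => h.1, fun h => ⟨h, hx⟩⟩)]
  apply pvAloop_eq_merge
  · exact pairwise_lt_of_sorted_nodup _ (PySem.Set.nodup_diff _ _ (PySem.Set.nodup_ofList lost))
  · exact pairwise_lt_of_sorted_nodup _ (PySem.Set.nodup_diff _ _ (PySem.Set.nodup_ofList reserve))
  · intro x hx hmem
    rw [PySem.List.mem_sorted] at hx hmem
    have h1 := (PySem.Set.mem_diff _ _ _).mp hx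
    have h2 := (PySem.Set.mem_diff _ _ _).mp hmem
    exact h1.2 h2.1
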